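-- pv_equiv track=rewrite | github.com/ManojKumarPatnaik/practice-alg | Solution/AngryFrogs.py | solution
-- ===== SOURCE A (Python) =====
-- def solution(blocks):
--   """
--   Calculates the maximum possible distance between two frogs sitting on blocks.
--
--   Args:
--     blocks (list): A list of integers representing the heights of the blocks.
--
--   Returns:
--     int: The maximum possible distance between the two frogs.
--   """
--
--   # Get the number of blocks
--   N = len(blocks)
--
--   # Initialize the longest distance found so far
--   longestDistance = 0
--
--   # Iterate through the blocks array
--   for i in range(N):
--     # Initialize the left and right distances
--     leftDistance = i
--     rightDistance = i
--
--     # Move the left pointer to the left while the block height is non-decreasing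
--     while leftDistance > 0 and blocks[leftDistance - 1] >= blocks[leftDistance]:
--       leftDistance -= 1
--
--     # Move the right pointer to the right while the block height is non-decreasing
--     while rightDistance < N - 1 and blocks[rightDistance + 1] >= blocks[rightDistance]:
--       rightDistance += 1
--
--     # Update the longest distance if necessary
--     longestDistance = max(longestDistance, rightDistance - leftDistance + 1)
--
--   # Return the longest distance found
--   return longestDistance
-- ===== SOURCE B (Python) =====
-- def solution(blocks):
--     n = len(blocks)
--     # left[i]: leftmost index reachable from i walking left over non-decreasing-leftward heights
--     left = [0] * n
--     for i in range(n):
--         left[i] = left[i - 1] if i > 0 and blocks[i - 1] >= blocks[i] else i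
--     # right[i]: rightmost index reachable from i walking right
--     right = [0] * n
--     for i in range(n - 1, -1, -1):
--         right[i] = right[i + 1] if i < n - 1 and blocks[i + 1] >= blocks[i] else i
--     best = 0
--     for i in range(n):
--         d = right[i] - left[i] + 1
--         if d > best:
--             best = d
--     return best
-- ===== Notes on version B (the rewrite author's own statement) =====
-- stated objective: faster
-- what changed: Replaces the per-index while-loop scans with two O(n) DP reach arrays (left[i]/right[i] share the neighbour's reach), turning the O(n^2) algorithm into a single-pass O(n) one.
import Mathlib
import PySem

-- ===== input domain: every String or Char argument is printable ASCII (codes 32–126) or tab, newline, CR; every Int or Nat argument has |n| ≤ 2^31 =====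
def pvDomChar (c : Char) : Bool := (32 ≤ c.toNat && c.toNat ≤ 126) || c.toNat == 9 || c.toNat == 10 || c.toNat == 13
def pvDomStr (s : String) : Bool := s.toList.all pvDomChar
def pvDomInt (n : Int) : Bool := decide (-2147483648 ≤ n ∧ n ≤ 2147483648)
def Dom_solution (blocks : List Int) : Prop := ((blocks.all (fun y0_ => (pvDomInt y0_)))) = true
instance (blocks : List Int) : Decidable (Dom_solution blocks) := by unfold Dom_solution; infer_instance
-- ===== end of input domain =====

-- B replaces A's per-index while-loop scans with two linear DP reach arrays (asymptotic speed-up).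
-- All list indices in both programs are provably in range, so indexing is ported with getD.

-- ===== PORT A =====
-- A's inner while loop moving leftDistance left
def leftWhile (blocks : List Int) : Nat → Nat
  | 0 => 0
  | (l + 1) =>
    if blocks.getD l 0 ≥ blocks.getD (l + 1) 0 then leftWhile blocks l else l + 1

-- A's inner while loop moving rightDistance right
def rightWhile (blocks : List Int) (N : Nat) (r : Nat) : Nat :=
  if h : r < N - 1 ∧ blocks.getD (r + 1) 0 ≥ blocks.getD r 0 then
    rightWhile blocks N (r + 1)
  else r
termination_by N - 1 - r
decreasing_by omega

def solution (blocks : List Int) : Int :=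
  let N := blocks.length
  (List.range N).foldl
    (fun longestDistance i =>
      max longestDistance
        ((rightWhile blocks N i : Int) - (leftWhile blocks i : Int) + 1)) 0

-- ===== PORT B =====
-- left array built left-to-right (appending), right array built right-to-left (prepending)
def buildLeft (blocks : List Int) (n : Nat) : List Nat :=
  (List.range n).foldl
    (fun acc i =>
      acc ++ [if 0 < i ∧ blocks.getD (i - 1) 0 ≥ blocks.getD i 0
              then acc.getD (i - 1) 0 else i]) []

def buildRight (blocks : List Int) (n : Nat) : List Nat :=
  (List.range n).foldr
    (fun i acc =>
      (if i < n - 1 ∧ blocks.getD (i + 1) 0 ≥ blocks.getD i 0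
       then acc.getD 0 0 else i) :: acc) []

def solution_alt (blocks : List Int) : Int :=
  let n := blocks.length
  let left := buildLeft blocks n
  let right := buildRight blocks n
  (List.range n).foldl
    (fun best i =>
      let d : Int := (right.getD i 0 : Int) - (left.getD i 0 : Int) + 1
      if d > best then d else best) 0

-- ===== PRECONDITION & SPEC =====
def Spec_solution (blocks : List Int) (out : Int) : Prop := out = solution_alt blocks
instance (blocks : List Int) (out : Int) : Decidable (Spec_solution blocks out) := by unfold Spec_solution; infer_instance

-- ===== CLAIM (what is proved, stated in full; the proofs are below) =====
def Claim_equal_solution : Prop := ∀ (blocks : List Int), Dom_solution blocks → Spec_solution blocks (solution blocks)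

-- ===== LEMMAS AND PROOFS =====

theorem getD_map_range {α : Type} (f : Nat → α) (d : α) (n j : Nat) (h : j < n) :
    (((List.range n).map f).getD j d) = f j := by
  simp [List.getD, h]

-- B's left array holds exactly the results of A's left while loop
theorem buildLeft_eq_map (blocks : List Int) (n : Nat) :
    buildLeft blocks n = (List.range n).map (leftWhile blocks) := by
  induction n with
  | zero => rfl
  | succ n ih =>
    unfold buildLeft at *
    rw [List.range_succ, List.foldl_append, List.map_append, ih]
    simp only [List.foldl_cons, List.foldl_nil]
    congr 1
    rcases n with _ | m
    · simp [leftWhile]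
    · simp [leftWhile]

-- B's right array holds exactly the results of A's right while loop
theorem buildRight_aux (blocks : List Int) (n : Nat) (m : Nat) : ∀ (k : Nat), k + m = n →
    (List.range' k m).foldr
      (fun i acc =>
        (if i < n - 1 ∧ blocks.getD (i + 1) 0 ≥ blocks.getD i 0
         then acc.getD 0 0 else i) :: acc) [] =
      (List.range' k m).map (rightWhile blocks n) := by
  induction m with
  | zero => intro k h; rfl
  | succ m ih =>
    intro k h
    rw [List.range'_succ, List.foldr_cons, List.map_cons, ih (k+1) (by omega)]
    congr 1
    rcases m with _ | m'
    · have hk : ¬ (k < n - 1 ∧ blocks.getD (k + 1) 0 ≥ blocks.getD k 0) :=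
        fun hc => by omega
      rw [if_neg hk]
      conv_rhs => rw [rightWhile]
      rw [dif_neg hk]
    · by_cases hc : k < n - 1 ∧ blocks.getD (k + 1) 0 ≥ blocks.getD k 0
      · rw [List.range'_succ, List.map_cons, if_pos hc]
        conv_rhs => rw [rightWhile]
        rw [dif_pos hc]
        rfl
      · rw [if_neg hc]
        conv_rhs => rw [rightWhile]
        rw [dif_neg hc]

theorem buildRight_eq_map (blocks : List Int) (n : Nat) :
    buildRight blocks n = (List.range n).map (rightWhile blocks n) := by
  unfold buildRight
  rw [List.range_eq_range']
  exact buildRight_aux blocks n n 0 (by omega)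

-- the two folds use step functions that agree on every index of range n
theorem foldl_congr_fun {α β : Type} (f g : β → α → β) (l : List α) (b : β)
    (h : ∀ a ∈ l, ∀ x, f x a = g x a) : l.foldl f b = l.foldl g b := by
  induction l generalizing b with
  | nil => rfl
  | cons a l ih =>
    simp only [List.foldl_cons]
    rw [h a (List.mem_cons_self) b]
    exact ih _ (fun a' ha' x => h a' (List.mem_cons_of_mem _ ha') x)

-- ===== VERDICT (by name: the statement is the Claim_ definition above) =====
theorem solution_spec : Claim_equal_solution := by
  intro blocks _
  unfold Spec_solution solution solution_alt
  simp only [buildLeft_eq_map, buildRight_eq_map]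
  apply foldl_congr_fun
  intro i hi x
  have hlt : i < blocks.length := List.mem_range.mp hi
  simp only [getD_map_range _ _ _ _ hlt]
  by_cases h : ((rightWhile blocks blocks.length i : Int) - (leftWhile blocks i : Int) + 1) ≤ x
  · rw [max_eq_left h, if_neg (by omega)]
  · rw [max_eq_right (by omega), if_pos (by omega)]
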